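-- pv_equiv track=rewrite | github.com/bx3/EE595 | seq_helper.py | compute_lumping_error
-- ===== SOURCE A (Python) =====
-- def compute_lumping_error(class_list, cluster_list):
--     lumping_err = 0
--     list_num = len(class_list)
--     for i in range(list_num):
--         the_class = class_list[i]
--         the_cluster = cluster_list[i]
--
--         for j in range(i, list_num):
--             other_class = class_list[j]
--             other_cluster = cluster_list[j]
--             if the_class!=other_class and the_cluster==other_cluster:
--                 lumping_err += 1
--     return lumping_err
-- ===== SOURCE B (Python) =====
-- def compute_lumping_error(class_list, cluster_list):
--     # One pass: for each element, count earlier elements in the same cluster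
--     # minus earlier elements with the same (cluster, class); O(n) via dicts.
--     err = 0
--     cluster_count = {}
--     pair_count = {}
--     for c, k in zip(class_list, cluster_list):
--         err += cluster_count.get(k, 0) - pair_count.get((k, c), 0)
--         cluster_count[k] = cluster_count.get(k, 0) + 1
--         pair_count[(k, c)] = pair_count.get((k, c), 0) + 1
--     return err
-- ===== Notes on version B (the rewrite author's own statement) =====
-- stated objective: faster
-- what changed: Replaced the quadratic all-pairs double loop with a single pass that keeps per-cluster and per-(cluster,class) counters in dicts, adding for each element the number of earlier same-cluster different-class elements.
import Mathlib
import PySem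

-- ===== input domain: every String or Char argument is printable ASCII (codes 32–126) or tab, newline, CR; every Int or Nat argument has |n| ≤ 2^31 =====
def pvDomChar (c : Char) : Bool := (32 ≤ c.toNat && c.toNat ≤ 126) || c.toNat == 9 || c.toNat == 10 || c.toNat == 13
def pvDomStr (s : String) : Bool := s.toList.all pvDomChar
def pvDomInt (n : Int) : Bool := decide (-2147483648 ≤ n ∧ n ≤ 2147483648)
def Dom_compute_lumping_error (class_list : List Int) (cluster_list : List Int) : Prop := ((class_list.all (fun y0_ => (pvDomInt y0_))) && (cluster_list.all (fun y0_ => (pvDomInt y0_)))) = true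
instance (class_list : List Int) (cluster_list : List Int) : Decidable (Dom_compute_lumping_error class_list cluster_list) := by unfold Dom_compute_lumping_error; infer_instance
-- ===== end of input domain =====

-- B replaces A's quadratic all-pairs double loop by one pass with per-cluster and
-- per-(cluster,class) dict counters (objective: faster; a timing run measured it).

-- ===== PORT A =====
def compute_lumping_error (class_list : List Int) (cluster_list : List Int) : Int :=
  let list_num : Int := (class_list.length : Int)
  (PySem.List.pyRange 0 list_num 1).foldl (fun lumping_err i =>
    let the_class := PySem.List.pyGetD class_list i 0
    let the_cluster := PySem.List.pyGetD cluster_list i 0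
    (PySem.List.pyRange i list_num 1).foldl (fun le j =>
      let other_class := PySem.List.pyGetD class_list j 0
      let other_cluster := PySem.List.pyGetD cluster_list j 0
      if the_class ≠ other_class ∧ the_cluster = other_cluster then le + 1 else le)
      lumping_err) 0

-- ===== PORT B =====
-- loop body of Source B: err update, then the two counter updates
def pvStepB (st : Int × PySem.Dict Int Int × PySem.Dict (Int × Int) Int) (p : Int × Int) :
    Int × PySem.Dict Int Int × PySem.Dict (Int × Int) Int :=
  let c := p.1
  let k := p.2
  (st.1 + st.2.1.getD k 0 - st.2.2.getD (k, c) 0,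
   st.2.1.insert k (st.2.1.getD k 0 + 1),
   st.2.2.insert (k, c) (st.2.2.getD (k, c) 0 + 1))

def compute_lumping_error_alt (class_list : List Int) (cluster_list : List Int) : Int :=
  ((class_list.zip cluster_list).foldl pvStepB (0, PySem.Dict.empty, PySem.Dict.empty)).1

-- ===== PRECONDITION & SPEC =====
-- Pre_ excludes exactly the inputs where A raises IndexError (cluster_list shorter than class_list)
def Pre_compute_lumping_error (class_list : List Int) (cluster_list : List Int) : Prop :=
  class_list.length ≤ cluster_list.length
instance (class_list : List Int) (cluster_list : List Int) : Decidable (Pre_compute_lumping_error class_list cluster_list) := by unfold Pre_compute_lumping_error; infer_instance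

def pvWitness_compute_lumping_error : List Int × List Int := ([0, 1, 0], [5, 5, 5])

def Spec_compute_lumping_error (class_list : List Int) (cluster_list : List Int) (out : Int) : Prop := out = compute_lumping_error_alt class_list cluster_list
instance (class_list : List Int) (cluster_list : List Int) (out : Int) : Decidable (Spec_compute_lumping_error class_list cluster_list out) := by unfold Spec_compute_lumping_error; infer_instance

-- ===== CLAIM (what is proved, stated in full; the proofs are below) =====
def Claim_equal_compute_lumping_error : Prop := ∀ (class_list : List Int) (cluster_list : List Int), Dom_compute_lumping_error class_list cluster_list → Pre_compute_lumping_error class_list cluster_list → Spec_compute_lumping_error class_list cluster_list (compute_lumping_error class_list cluster_list)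

-- ===== LEMMAS AND PROOFS =====

def pvN : List (Int × Int) → Int
  | [] => 0
  | y :: ys => (ys.countP (fun z => decide (y.1 ≠ z.1 ∧ y.2 = z.2)) : Int) + pvN ys
def pvG : List (Int × Int) → List (Int × Int) → Int
  | _, [] => 0
  | p, x :: xs => (p.countP (fun y => decide (y.2 = x.2 ∧ y.1 ≠ x.1)) : Int) + pvG (p ++ [x]) xs
def pvCC (p : List (Int × Int)) : PySem.Dict Int Int :=
  (p.map (·.2)).foldl (fun d x => d.insert x (d.getD x 0 + 1)) PySem.Dict.empty
def pvPC (p : List (Int × Int)) : PySem.Dict (Int × Int) Int :=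
  (p.map (fun y => (y.2, y.1))).foldl (fun d x => d.insert x (d.getD x 0 + 1)) PySem.Dict.empty
lemma pvCC_getD (p : List (Int × Int)) (k : Int) :
    (pvCC p).getD k 0 = ((p.map (·.2)).count k : Int) := by
  simp [pvCC, PySem.Dict.getD_foldl_insert_add_one]
lemma pvPC_getD (p : List (Int × Int)) (k c : Int) :
    (pvPC p).getD (k, c) 0 = ((p.map (fun y => (y.2, y.1))).count (k, c) : Int) := by
  simp [pvPC, PySem.Dict.getD_foldl_insert_add_one]
lemma pv_count_diff (p : List (Int × Int)) (c k : Int) :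
    ((p.map (·.2)).count k : Int) - ((p.map (fun y => (y.2, y.1))).count (k, c) : Int)
      = (p.countP (fun y => decide (y.2 = k ∧ y.1 ≠ c)) : Int) := by
  induction p with
  | nil => simp
  | cons a p ih =>
    simp only [List.map_cons, List.count_cons, List.countP_cons]
    by_cases h1 : a.2 = k <;> by_cases h2 : a.1 = c <;>
      (simp [h1, h2, Prod.ext_iff] at ih ⊢; omega)
lemma pvCC_append (p : List (Int × Int)) (x : Int × Int) :
    pvCC (p ++ [x]) = (pvCC p).insert x.2 ((pvCC p).getD x.2 0 + 1) := by
  simp [pvCC, List.foldl_append]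
lemma pvPC_append (p : List (Int × Int)) (x : Int × Int) :
    pvPC (p ++ [x]) = (pvPC p).insert (x.2, x.1) ((pvPC p).getD (x.2, x.1) 0 + 1) := by
  simp [pvPC, List.foldl_append]
lemma pvB_fold (l : List (Int × Int)) : ∀ (p : List (Int × Int)) (e : Int),
    (l.foldl pvStepB (e, pvCC p, pvPC p)).1 = e + pvG p l := by
  induction l with
  | nil => intro p e; simp [pvG]
  | cons x l ih =>
    intro p e
    have hstep : pvStepB (e, pvCC p, pvPC p) x
        = (e + (p.countP (fun y => decide (y.2 = x.2 ∧ y.1 ≠ x.1)) : Int), pvCC (p ++ [x]), pvPC (p ++ [x])) := by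
      simp only [pvStepB, pvCC_append, pvPC_append]
      rw [pvCC_getD, pvPC_getD, add_sub_assoc, pv_count_diff]
    simp only [List.foldl_cons, hstep, ih, pvG]
    ring
lemma pvB_eq (cl cu : List Int) :
    ((cl.zip cu).foldl pvStepB (0, PySem.Dict.empty, PySem.Dict.empty)).1 = pvG [] (cl.zip cu) := by
  have := pvB_fold (cl.zip cu) [] 0
  simpa [pvCC, pvPC] using this
def pvCross (p l : List (Int × Int)) : Int :=
  (l.map (fun x => (p.countP (fun y => decide (y.2 = x.2 ∧ y.1 ≠ x.1)) : Int))).sum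
lemma pvCross_append (p : List (Int × Int)) (x : Int × Int) : ∀ l,
    pvCross (p ++ [x]) l = pvCross p l + (l.countP (fun z => decide (x.1 ≠ z.1 ∧ x.2 = z.2)) : Int) := by
  intro l
  induction l with
  | nil => simp [pvCross]
  | cons z l ih =>
    simp only [pvCross, List.map_cons, List.sum_cons, List.countP_cons, List.countP_append,
      List.countP_nil, decide_eq_true_eq] at ih ⊢
    rw [if_congr (Iff.intro (fun h => ⟨h.2, h.1⟩) (fun h => ⟨h.2, h.1⟩) :
      (x.2 = z.2 ∧ x.1 ≠ z.1) ↔ (x.1 ≠ z.1 ∧ x.2 = z.2)) rfl rfl]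
    push_cast at ih ⊢
    omega
lemma pvG_eq (l : List (Int × Int)) : ∀ p, pvG p l = pvCross p l + pvN l := by
  induction l with
  | nil => intro p; simp [pvG, pvCross, pvN]
  | cons x xs ih =>
    intro p
    rw [pvG, ih (p ++ [x]), pvCross_append, pvN]
    simp only [pvCross, List.map_cons, List.sum_cons]
    ring
lemma pvCross_nil (l : List (Int × Int)) : pvCross [] l = 0 := by
  simp [pvCross]

lemma pvA_inner (cl cu : List Int) (h : cl.length ≤ cu.length) (c k : Int) :
    ∀ (m j : Nat), j + m = cl.length → ∀ (acc : Int),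
    (PySem.List.pyRange (j : Int) (cl.length : Int) 1).foldl (fun le j' =>
        if c ≠ PySem.List.pyGetD cl j' 0 ∧ k = PySem.List.pyGetD cu j' 0 then le + 1 else le) acc
      = acc + (((cl.zip cu).drop j).countP (fun z => decide (c ≠ z.1 ∧ k = z.2)) : Int) := by
  intro m
  induction m with
  | zero =>
    intro j hj acc
    rw [PySem.List.pyRange_one_eq_nil (by exact_mod_cast (by omega : cl.length ≤ j))]
    have hd : (cl.zip cu).drop j = [] := by
      apply List.drop_eq_nil_of_le
      simp [List.length_zip]
      omega
    simp [hd]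
  | succ m ih =>
    intro j hj acc
    have hjlt : j < cl.length := by omega
    have hjcu : j < cu.length := by omega
    have hjz : j < (cl.zip cu).length := by simp [List.length_zip]; omega
    rw [PySem.List.pyRange_one_cons (by exact_mod_cast hjlt)]
    rw [List.foldl_cons]
    have h1 : PySem.List.pyGetD cl (j : Int) 0 = cl[j] := by
      rw [PySem.List.pyGetD_natCast]; exact List.getD_eq_getElem cl 0 hjlt
    have h2 : PySem.List.pyGetD cu (j : Int) 0 = cu[j] := by
      rw [PySem.List.pyGetD_natCast]; exact List.getD_eq_getElem cu 0 hjcu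
    have hz : (cl.zip cu)[j] = (cl[j], cu[j]) := by simp [List.getElem_zip]
    rw [List.drop_eq_getElem_cons hjz, List.countP_cons, hz]
    have hcast : (j : Int) + 1 = ((j + 1 : Nat) : Int) := by push_cast; ring
    rw [hcast, ih (j + 1) (by omega)]
    by_cases hc : c ≠ cl[j] ∧ k = cu[j] <;> simp [h1, h2, hc]
    omega

lemma pvA_outer (cl cu : List Int) (h : cl.length ≤ cu.length) :
    ∀ (m i : Nat), i + m = cl.length → ∀ (acc : Int),
    (PySem.List.pyRange (i : Int) (cl.length : Int) 1).foldl (fun lumping_err i' =>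
        (PySem.List.pyRange i' (cl.length : Int) 1).foldl (fun le j =>
          if PySem.List.pyGetD cl i' 0 ≠ PySem.List.pyGetD cl j 0 ∧
             PySem.List.pyGetD cu i' 0 = PySem.List.pyGetD cu j 0 then le + 1 else le)
          lumping_err) acc
      = acc + pvN ((cl.zip cu).drop i) := by
  intro m
  induction m with
  | zero =>
    intro i hi acc
    rw [PySem.List.pyRange_one_eq_nil (by exact_mod_cast (by omega : cl.length ≤ i))]
    have hd : (cl.zip cu).drop i = [] := by
      apply List.drop_eq_nil_of_le
      simp [List.length_zip]
      omega
    simp [hd, pvN]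
  | succ m ih =>
    intro i hi acc
    have hilt : i < cl.length := by omega
    have hicu : i < cu.length := by omega
    have hiz : i < (cl.zip cu).length := by simp [List.length_zip]; omega
    rw [PySem.List.pyRange_one_cons (by exact_mod_cast hilt)]
    rw [List.foldl_cons]
    rw [pvA_inner cl cu h (PySem.List.pyGetD cl (i : Int) 0) (PySem.List.pyGetD cu (i : Int) 0)
      (m + 1) i (by omega)]
    have hcast : (i : Int) + 1 = ((i + 1 : Nat) : Int) := by push_cast; ring
    rw [hcast, ih (i + 1) (by omega)]
    have h1 : PySem.List.pyGetD cl (i : Int) 0 = cl[i] := by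
      rw [PySem.List.pyGetD_natCast]; exact List.getD_eq_getElem cl 0 hilt
    have h2 : PySem.List.pyGetD cu (i : Int) 0 = cu[i] := by
      rw [PySem.List.pyGetD_natCast]; exact List.getD_eq_getElem cu 0 hicu
    have hz : (cl.zip cu)[i] = (cl[i], cu[i]) := by simp [List.getElem_zip]
    rw [List.drop_eq_getElem_cons hiz, List.countP_cons, hz, pvN]
    simp [h1, h2]
    omega

lemma pvB_eq_pvN (cl cu : List Int) :
    compute_lumping_error_alt cl cu = pvN (cl.zip cu) := by
  unfold compute_lumping_error_alt
  rw [pvB_eq, pvG_eq, pvCross_nil, zero_add]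

-- ===== VERDICT (by name: the statement is the Claim_ definition above) =====
theorem compute_lumping_error_spec : Claim_equal_compute_lumping_error := by
  intro cl cu _ hpre
  unfold Spec_compute_lumping_error
  rw [pvB_eq_pvN]
  have := pvA_outer cl cu hpre cl.length 0 (by omega) 0
  simpa [compute_lumping_error] using this
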